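-- pv_equiv track=rewrite | github.com/MegaGiciorPortas/WDI-Zadania | 02-tablice_jednowymiarowe/2.78.py | indeksy_fibonacciego
-- ===== SOURCE A (Python) =====
-- def indeksy_fibonacciego(n):
--     tablica = [0 for _ in range(n + 1)]
--     tablica[0] = 1
--     a1 = 1
--     a2 = 1
--
--     while a2 <= n:
--         a1, a2 = a2, a1 + a2
--         tablica[a1] = 1
--     return tablica
-- ===== SOURCE B (Python) =====
-- def indeksy_fibonacciego(n):
--     def fibs_upto(a, b, acc):
--         if a > n:
--             return acc
--         acc.add(a)
--         return fibs_upto(b, a + b, acc)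
--     fibs = fibs_upto(1, 1, set())
--     return [1 if i == 0 or i in fibs else 0 for i in range(n + 1)]
-- ===== Notes on version B (the rewrite author's own statement) =====
-- stated objective: alternative
-- what changed: A scatter-writes 1s into a preallocated array while walking the Fibonacci pair in a while loop; B recursively collects the Fibonacci numbers up to n into a set and then builds the result in one comprehension testing each index for membership.
import Mathlib
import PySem

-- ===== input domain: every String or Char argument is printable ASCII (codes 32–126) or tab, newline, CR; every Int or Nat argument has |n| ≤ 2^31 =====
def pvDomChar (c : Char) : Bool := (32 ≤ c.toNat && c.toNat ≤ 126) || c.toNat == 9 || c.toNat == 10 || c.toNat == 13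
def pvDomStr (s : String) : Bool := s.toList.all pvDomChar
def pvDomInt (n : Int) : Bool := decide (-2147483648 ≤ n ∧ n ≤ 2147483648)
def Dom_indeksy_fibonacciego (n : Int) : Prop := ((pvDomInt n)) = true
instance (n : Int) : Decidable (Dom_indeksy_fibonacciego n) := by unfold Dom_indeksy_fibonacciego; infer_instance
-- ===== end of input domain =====

-- B collects the Fibonacci numbers ≤ n into a set recursively and maps a membership
-- test over all indices, instead of A's scatter-writes into a preallocated array (objective: alternative).
-- A mutates no argument; equivalence is about the return value.

-- ===== PORT A =====
-- fuel = (n+1).toNat makes the while loop total; it suffices since a2 strictly increases (proved below).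
def fibLoopA : Nat → Int → Int → Int → List Int → List Int
  | 0, _, _, _, tab => tab
  | fuel+1, n, a1, a2, tab =>
      if a2 ≤ n then
        -- a1, a2 = a2, a1 + a2; tablica[a1] = 1  (new a1 = old a2; index in range since a2 ≤ n)
        fibLoopA fuel n a2 (a1 + a2) (PySem.List.pySetD tab a2 1)
      else tab

def indeksy_fibonacciego (n : Int) : List Int :=
  -- tablica = [0]*(n+1); tablica[0] = 1  (raises IndexError for n < 0: excluded by Pre_)
  let tablica := PySem.List.pySetD (List.replicate (n + 1).toNat (0 : Int)) 0 1
  fibLoopA (n + 1).toNat n 1 1 tablica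

-- ===== PORT B =====
def fibsUpto : Nat → Int → Int → Int → PySem.Set Int → PySem.Set Int
  | 0, _, _, _, acc => acc
  | fuel+1, n, a, b, acc =>
      if a > n then acc
      else fibsUpto fuel n b (a + b) (PySem.Set.add acc a)

def indeksy_fibonacciego_alt (n : Int) : List Int :=
  let fibs := fibsUpto (n + 1).toNat n 1 1 PySem.Set.empty
  (PySem.List.pyRange 0 (n + 1) 1).map
    (fun i => if i = 0 ∨ PySem.Set.contains fibs i then (1 : Int) else 0)

-- ===== PRECONDITION & SPEC =====
-- Pre_ excludes exactly n < 0, where Python A raises IndexError (tablica[0] = 1 on []).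
def Pre_indeksy_fibonacciego (n : Int) : Prop := 0 ≤ n
instance (n : Int) : Decidable (Pre_indeksy_fibonacciego n) := by unfold Pre_indeksy_fibonacciego; infer_instance
def pvWitness_indeksy_fibonacciego : Int := 5

def Spec_indeksy_fibonacciego (n : Int) (out : List Int) : Prop := out = indeksy_fibonacciego_alt n
instance (n : Int) (out : List Int) : Decidable (Spec_indeksy_fibonacciego n out) := by unfold Spec_indeksy_fibonacciego; infer_instance

-- ===== CLAIM =====
def Claim_equal_indeksy_fibonacciego : Prop := ∀ (n : Int), Dom_indeksy_fibonacciego n → Pre_indeksy_fibonacciego n → Spec_indeksy_fibonacciego n (indeksy_fibonacciego n)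

-- ===== LEMMAS AND PROOFS =====

-- the common Fibonacci chain: values a, checked against n, pair stepping (a,b) → (b,a+b)
def chain (n : Int) : Nat → Int → Int → List Int
  | 0, _, _ => []
  | fuel+1, a, b => if a ≤ n then a :: chain n fuel b (a + b) else []

theorem chain_gt (n : Int) (fuel : Nat) (a b : Int) (h : n < a) :
    chain n fuel a b = [] := by
  cases fuel with
  | zero => rfl
  | succ f => simp only [chain, if_neg (show ¬ a ≤ n by omega)]

theorem chain_fuel_eq (n : Int) : ∀ (fuel fuel' : Nat) (a b : Int), 1 ≤ a → 1 ≤ b →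
    (n + 1 - b).toNat + 1 ≤ fuel → (n + 1 - b).toNat + 1 ≤ fuel' →
    chain n fuel a b = chain n fuel' a b := by
  intro fuel
  induction fuel with
  | zero => intro fuel' a b _ _ hf _; omega
  | succ f ih =>
    intro fuel' a b ha hb hf hf'
    obtain ⟨f', rfl⟩ : ∃ f', fuel' = f' + 1 := ⟨fuel' - 1, by omega⟩
    simp only [chain]
    split
    · rename_i hle
      by_cases hbn : b ≤ n
      · rw [ih f' b (a + b) hb (by omega) (by omega) (by omega)]
      · rw [chain_gt n f b (a+b) (by omega), chain_gt n f' b (a+b) (by omega)]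
    · rfl

theorem chain_mem (n : Int) : ∀ (fuel : Nat) (a b v : Int), 1 ≤ a → 1 ≤ b →
    v ∈ chain n fuel a b → 1 ≤ v ∧ v ≤ n := by
  intro fuel
  induction fuel with
  | zero => intro a b v _ _ h; simp [chain] at h
  | succ f ih =>
    intro a b v ha hb h
    simp only [chain] at h
    split at h
    · rcases List.mem_cons.mp h with rfl | h
      · omega
      · exact ih b (a + b) v hb (by omega) h
    · simp at h

theorem fibLoopA_eq_foldl (n : Int) : ∀ (fuel : Nat) (a1 a2 : Int) (tab : List Int),
    fibLoopA fuel n a1 a2 tab =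
      (chain n fuel a2 (a1 + a2)).foldl (fun t v => PySem.List.pySetD t v 1) tab := by
  intro fuel
  induction fuel with
  | zero => intro a1 a2 tab; rfl
  | succ f ih =>
    intro a1 a2 tab
    simp only [fibLoopA, chain]
    split
    · rw [ih a2 (a1 + a2) (PySem.List.pySetD tab a2 1)]; rfl
    · rfl

theorem fibsUpto_eq_foldl (n : Int) : ∀ (fuel : Nat) (a b : Int) (acc : PySem.Set Int),
    fibsUpto fuel n a b acc = (chain n fuel a b).foldl PySem.Set.add acc := by
  intro fuel
  induction fuel with
  | zero => intro a b acc; rfl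
  | succ f ih =>
    intro a b acc
    simp only [fibsUpto, chain]
    by_cases h : a ≤ n
    · rw [if_neg (by omega), if_pos h, ih]; rfl
    · rw [if_pos (by omega), if_neg h]; rfl

theorem mem_foldl_add' : ∀ (L : List Int) (s : PySem.Set Int) (y : Int),
    y ∈ L.foldl PySem.Set.add s ↔ y ∈ s ∨ y ∈ L := by
  intro L
  induction L with
  | nil => intro s y; simp
  | cons v L ih =>
    intro s y
    simp only [List.foldl_cons, ih, PySem.Set.mem_add, List.mem_cons]
    tauto

theorem foldl_setD_length : ∀ (L : List Int) (tab : List Int),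
    (L.foldl (fun t v => PySem.List.pySetD t v 1) tab).length = tab.length := by
  intro L
  induction L with
  | nil => intro tab; rfl
  | cons v L ih => intro tab; rw [List.foldl_cons, ih, PySem.List.length_pySetD]

theorem foldl_setD_getElem? : ∀ (L : List Int) (tab : List Int) (k : Nat),
    (∀ v ∈ L, 0 ≤ v ∧ v.toNat < tab.length) →
    (L.foldl (fun t v => PySem.List.pySetD t v 1) tab)[k]? =
      if (k : Int) ∈ L then some 1 else tab[k]? := by
  intro L
  induction L with
  | nil => intro tab k _; simp
  | cons v L ih =>
    intro tab k hv
    obtain ⟨hv0, hvlen⟩ := hv v (List.mem_cons_self ..)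
    rw [List.foldl_cons, ih _ k (fun w hw => by
      obtain ⟨h1, h2⟩ := hv w (List.mem_cons_of_mem _ hw)
      exact ⟨h1, by rwa [PySem.List.length_pySetD]⟩)]
    rw [PySem.List.pySetD_of_nonneg tab 1 hv0, List.getElem?_set]
    by_cases hkL : (k : Int) ∈ L
    · simp [hkL]
    · by_cases hkv : (k : Int) = v
      · have hvk : v.toNat = k := by omega
        rw [if_neg hkL, if_pos hvk, if_pos hvlen, if_pos (List.mem_cons.mpr (Or.inl hkv))]
      · have hvk : v.toNat ≠ k := by omega
        rw [if_neg hkL, if_neg hvk, if_neg (fun h => (List.mem_cons.mp h).elim hkv hkL)]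

-- ===== VERDICT =====
theorem indeksy_fibonacciego_spec : Claim_equal_indeksy_fibonacciego := by
  unfold Claim_equal_indeksy_fibonacciego
  intro n _ hpre
  unfold Spec_indeksy_fibonacciego
  unfold Pre_indeksy_fibonacciego at hpre
  by_cases hn0 : n = 0
  · subst hn0; decide
  have hn1 : 1 ≤ n := by omega
  have hF : (n + 1).toNat = n.toNat + 1 := by omega
  -- A as a foldl over the chain
  unfold indeksy_fibonacciego
  rw [fibLoopA_eq_foldl]
  have hchainA : chain n (n + 1).toNat 1 (1 + 1) = chain n n.toNat 1 2 := by
    norm_num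
    exact chain_fuel_eq n (n + 1).toNat n.toNat 1 2 (by omega) (by omega) (by omega) (by omega)
  rw [hchainA]
  -- B's set as the chain with one extra leading 1
  unfold indeksy_fibonacciego_alt
  rw [fibsUpto_eq_foldl]
  have hchainB : chain n (n + 1).toNat 1 1 = 1 :: chain n n.toNat 1 2 := by
    rw [hF]
    simp only [chain, if_pos hn1]
    norm_num
  rw [hchainB]
  set C := chain n n.toNat 1 2 with hC
  have hmemC : ∀ v ∈ C, 1 ≤ v ∧ v ≤ n := fun v hv =>
    chain_mem n n.toNat 1 2 v (by omega) (by omega) hv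
  have h1C : (1 : Int) ∈ C := by
    rw [hC]
    obtain ⟨m, hm⟩ : ∃ m, n.toNat = m + 1 := ⟨n.toNat - 1, by omega⟩
    rw [hm]
    simp [chain, if_pos hn1]
  -- pointwise comparison
  apply List.ext_getElem?
  intro k
  have hlenTab : (PySem.List.pySetD (List.replicate (n + 1).toNat (0 : Int)) 0 1).length
      = (n + 1).toNat := by rw [PySem.List.length_pySetD, List.length_replicate]
  by_cases hk : k < (n + 1).toNat
  · -- left side
    rw [foldl_setD_getElem? C _ k (fun v hv => by
      obtain ⟨h1, h2⟩ := hmemC v hv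
      rw [hlenTab]; constructor <;> omega)]
    -- right side
    have hcast : n + 1 = ((n.toNat + 1 : Nat) : Int) := by omega
    rw [hcast, PySem.List.getElem?_map_pyRange_zero _ (n.toNat + 1) k (by omega)]
    rw [PySem.List.pySetD_of_nonneg _ 1 (le_refl 0), List.getElem?_set, List.getElem?_replicate]
    simp only [Int.toNat_zero, List.length_replicate]
    have hcontains : (PySem.Set.contains (List.foldl PySem.Set.add PySem.Set.empty (1 :: C)) (k : Int)) = true
        ↔ ((k : Int) = 1 ∨ (k : Int) ∈ C) := by
      rw [PySem.Set.contains_iff, mem_foldl_add']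
      simp [PySem.Set.empty]
    by_cases hkc : (k : Int) ∈ C
    · have hk0 : (0 : Nat) ≠ k := by have := (hmemC _ hkc).1; omega
      rw [if_pos hkc, if_pos (Or.inr (hcontains.mpr (Or.inr hkc)))]
    · rw [if_neg hkc]
      by_cases hk0 : k = 0
      · subst hk0
        rw [if_pos rfl, if_pos (show 0 < ((n.toNat + 1 : Nat) : Int).toNat by simp),
          if_pos (Or.inl (by norm_num))]
      · have hknz : (k : Int) ≠ 0 := by omega
        have hnc : ¬ ((k : Int) = 0 ∨ PySem.Set.contains (List.foldl PySem.Set.add PySem.Set.empty (1 :: C)) (k : Int) = true) := by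
          rintro (h | h)
          · exact hknz h
          · rcases hcontains.mp h with h1 | h2
            · exact hkc (h1 ▸ h1C)
            · exact hkc h2
        rw [if_neg (fun h : (0:Nat) = k => hk0 h.symm), if_pos (show k < ((n.toNat + 1 : Nat) : Int).toNat by simp; omega), if_neg hnc]
  · rw [List.getElem?_eq_none, List.getElem?_eq_none]
    · rw [List.length_map, PySem.List.length_pyRange_one]; omega
    · rw [foldl_setD_length, hlenTab]; omega
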